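-- pv_equiv track=rewrite | github.com/JasonLeon01/Ludork | C_Extensions/parse.py | parseFormatTypes
-- ===== SOURCE A (Python) =====
-- from typing import Any, Dict, Iterable, List, Optional, Tuple
--
-- formatTypeMap = {
--     "i": "int",
--     "l": "int",
--     "n": "int",
--     "h": "int",
--     "H": "int",
--     "b": "int",
--     "B": "int",
--     "k": "int",
--     "K": "int",
--     "L": "int",
--     "f": "float",
--     "d": "float",
--     "p": "bool",
--     "s": "str",
-- }
--
-- def parseFormatTypes(fmt: str, count: int) -> List[str]:
--     types: List[str] = []
--     i = 0
--     while i < len(fmt):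
--         ch = fmt[i]
--         if ch in ("|", ":", ";", " "):
--             i += 1
--             continue
--         if ch == "O":
--             types.append("Any")
--             if i + 1 < len(fmt) and fmt[i + 1] in ("!", "&"):
--                 i += 2
--                 continue
--             i += 1
--             continue
--         if ch in formatTypeMap:
--             types.append(formatTypeMap[ch])
--             i += 1
--             continue
--         types.append("Any")
--         i += 1
--     if len(types) != count:
--         types = ["Any"] * count
--     return types
-- ===== SOURCE B (Python) =====
-- formatTypeMap = {
--     "i": "int",
--     "l": "int",
--     "n": "int",
--     "h": "int",
--     "H": "int",
--     "b": "int",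
--     "B": "int",
--     "k": "int",
--     "K": "int",
--     "L": "int",
--     "f": "float",
--     "d": "float",
--     "p": "bool",
--     "s": "str",
-- }
--
-- def parseFormatTypes(fmt, count):
--     # Stateless local rule: a '!'/'&' is consumed exactly when its immediate
--     # predecessor is 'O' (an 'O' can never itself be consumed, so the scan state
--     # of the original loop collapses to the previous character).  One
--     # comprehension over predecessor/character pairs; 'O' falls out of the
--     # dict .get default since it maps to "Any" like any unknown char.
--     types = [formatTypeMap.get(c, "Any")
--              for p, c in zip(" " + fmt, fmt)
--              if not (p == "O" and c in ("!", "&"))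
--              and c not in ("|", ":", ";", " ")]
--     if len(types) != count:
--         types = ["Any"] * count
--     return types
-- ===== Notes on version B (the rewrite author's own statement) =====
-- stated objective: simpler
-- what changed: Replaced A's stateful index loop with lookahead (fmt[i+1], i += 2) by a stateless single comprehension over predecessor/character pairs zip(' '+fmt, fmt): a '!'/'&' is dropped exactly when its immediate predecessor is 'O', and the 'O' case folds into the dict .get default.
import Mathlib
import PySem

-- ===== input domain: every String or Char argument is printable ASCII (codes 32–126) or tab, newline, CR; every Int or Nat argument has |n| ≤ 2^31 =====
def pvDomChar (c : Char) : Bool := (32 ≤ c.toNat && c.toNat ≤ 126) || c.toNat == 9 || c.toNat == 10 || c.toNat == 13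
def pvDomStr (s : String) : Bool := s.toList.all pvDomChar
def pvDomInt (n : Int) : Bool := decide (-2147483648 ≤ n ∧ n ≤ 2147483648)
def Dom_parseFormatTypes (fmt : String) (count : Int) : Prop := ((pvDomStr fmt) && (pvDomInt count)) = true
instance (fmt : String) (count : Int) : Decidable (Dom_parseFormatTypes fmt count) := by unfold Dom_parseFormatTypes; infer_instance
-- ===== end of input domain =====

-- B replaces A's stateful index loop with lookahead (i += 2) by one stateless comprehension
-- over predecessor/character pairs zip(' '+fmt, fmt); same return value, simpler decomposition.

-- ===== PORT A =====
-- the module-level dict formatTypeMap (shared context of both implementations)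
def formatTypeMap : PySem.Dict Char String :=
  PySem.Dict.ofList
    [('i', "int"), ('l', "int"), ('n', "int"), ('h', "int"), ('H', "int"),
     ('b', "int"), ('B', "int"), ('k', "int"), ('K', "int"), ('L', "int"),
     ('f', "float"), ('d', "float"), ('p', "bool"), ('s', "str")]

-- A's while loop: consumes one char per step, or two when 'O' is followed by '!' / '&'
def parseLoopA : List Char → List String
  | [] => []
  | c :: rest =>
    if c = '|' ∨ c = ':' ∨ c = ';' ∨ c = ' ' then parseLoopA rest
    else if c = 'O' then
      "Any" ::
        (match rest with
         | d :: rest' => if d = '!' ∨ d = '&' then parseLoopA rest' else parseLoopA (d :: rest')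
         | [] => parseLoopA [])
    else
      match PySem.Dict.get? formatTypeMap c with
      | some t => t :: parseLoopA rest
      | none => "Any" :: parseLoopA rest

def parseFormatTypes (fmt : String) (count : Int) : List String :=
  let types := parseLoopA fmt.toList
  if (types.length : Int) ≠ count then List.replicate count.toNat "Any" else types

-- ===== PORT B =====
-- B's comprehension: filterMap over zip (' ' :: chars) chars, pc = (predecessor, char)
def parseFormatTypes_alt (fmt : String) (count : Int) : List String :=
  let cs := fmt.toList
  let types := (List.zip (' ' :: cs) cs).filterMap (fun pc =>
    if ¬(pc.1 = 'O' ∧ (pc.2 = '!' ∨ pc.2 = '&')) ∧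
       ¬(pc.2 = '|' ∨ pc.2 = ':' ∨ pc.2 = ';' ∨ pc.2 = ' ')
    then some (PySem.Dict.getD formatTypeMap pc.2 "Any") else none)
  if (types.length : Int) ≠ count then List.replicate count.toNat "Any" else types

-- ===== PRECONDITION & SPEC =====
def Spec_parseFormatTypes (fmt : String) (count : Int) (out : List String) : Prop := out = parseFormatTypes_alt fmt count
instance (fmt : String) (count : Int) (out : List String) : Decidable (Spec_parseFormatTypes fmt count out) := by unfold Spec_parseFormatTypes; infer_instance

-- ===== CLAIM (what is proved, stated in full; the proofs are below) =====
def Claim_equal_parseFormatTypes : Prop := ∀ (fmt : String) (count : Int), Dom_parseFormatTypes fmt count → Spec_parseFormatTypes fmt count (parseFormatTypes fmt count)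

-- ===== LEMMAS AND PROOFS =====

-- B's filterMap over the shifted zip, written as a recursion carrying the predecessor
def zipLoopB (p : Char) : List Char → List String
  | [] => []
  | c :: rest =>
    (if ¬(p = 'O' ∧ (c = '!' ∨ c = '&')) ∧ ¬(c = '|' ∨ c = ':' ∨ c = ';' ∨ c = ' ')
     then [PySem.Dict.getD formatTypeMap c "Any"] else []) ++ zipLoopB c rest

theorem filterMap_zip_eq_zipLoopB (p : Char) (cs : List Char) :
    (List.zip (p :: cs) cs).filterMap (fun pc =>
      if ¬(pc.1 = 'O' ∧ (pc.2 = '!' ∨ pc.2 = '&')) ∧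
         ¬(pc.2 = '|' ∨ pc.2 = ':' ∨ pc.2 = ';' ∨ pc.2 = ' ')
      then some (PySem.Dict.getD formatTypeMap pc.2 "Any") else none) = zipLoopB p cs := by
  induction cs generalizing p with
  | nil => rfl
  | cons c rest ih =>
    rw [zipLoopB]
    simp only [List.zip_cons_cons, List.filterMap_cons, ih c]
    split_ifs with h
    · simp
    · simp

-- the two loops agree; the second conjunct characterises B right after an 'O'
theorem parseLoop_agree (cs : List Char) :
    (∀ p, p ≠ 'O' → zipLoopB p cs = parseLoopA cs) ∧
    zipLoopB 'O' cs =
      (match cs with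
       | [] => []
       | d :: rest => if d = '!' ∨ d = '&' then parseLoopA rest else parseLoopA (d :: rest)) := by
  induction cs with
  | nil => exact ⟨fun _ _ => rfl, rfl⟩
  | cons c rest ih =>
    obtain ⟨ihf, ihO⟩ := ih
    have hmain : ∀ (noAbs : Bool), (noAbs = true) →
        ((if noAbs ∧ ¬(c = '|' ∨ c = ':' ∨ c = ';' ∨ c = ' ')
          then [PySem.Dict.getD formatTypeMap c "Any"] else []) ++ zipLoopB c rest)
          = parseLoopA (c :: rest) := by
      intro noAbs hn
      subst hn
      rw [parseLoopA.eq_def]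
      by_cases hsep : c = '|' ∨ c = ':' ∨ c = ';' ∨ c = ' '
      · have hcO : c ≠ 'O' := by rcases hsep with h|h|h|h <;> simp [h]
        simp [hsep, ihf c hcO]
      · by_cases hO : c = 'O'
        · subst hO
          have hAnyO : PySem.Dict.getD formatTypeMap 'O' "Any" = "Any" := by decide
          simp only [hsep, not_false_iff, and_true, if_true]
          rw [ihO]
          cases rest with
          | nil => simp [hAnyO, parseLoopA]
          | cons d rest' =>
            by_cases hd : d = '!' ∨ d = '&' <;> simp [hd, hAnyO]
        · simp only [if_neg hO, hsep, not_false_iff, and_true, if_true]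
          have : PySem.Dict.getD formatTypeMap c "Any" =
              (match PySem.Dict.get? formatTypeMap c with
               | some t => t | none => "Any") := by
            rw [PySem.Dict.getD]; cases PySem.Dict.get? formatTypeMap c <;> rfl
          rw [ihf c hO]
          cases hg : PySem.Dict.get? formatTypeMap c <;>
            simp [PySem.Dict.getD, hg]
    constructor
    · intro p hp
      rw [zipLoopB]
      have hnoabs : ¬(p = 'O' ∧ (c = '!' ∨ c = '&')) := fun h => hp h.1
      simpa [hnoabs] using hmain true rfl
    · rw [zipLoopB]
      by_cases hm : c = '!' ∨ c = '&'
      · have hcO : c ≠ 'O' := by rcases hm with h|h <;> simp [h]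
        simp [hm, ihf c hcO]
      · have : ¬('O' = 'O' ∧ (c = '!' ∨ c = '&')) := fun h => hm h.2
        simpa [this, hm] using hmain true rfl

-- ===== VERDICT (by name: the statement is the Claim_ definition above) =====
theorem parseFormatTypes_spec : Claim_equal_parseFormatTypes := by
  intro fmt count _
  unfold Spec_parseFormatTypes parseFormatTypes parseFormatTypes_alt
  simp only
  rw [filterMap_zip_eq_zipLoopB, (parseLoop_agree fmt.toList).1 ' ' (by decide)]
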